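-- pv_equiv track=rewrite | github.com/SamVain/Elemental-Words | Elemental Words.py | elementalForms
-- ===== SOURCE A (Python) =====
-- ELEMENTS = {
--     'H': 'Hydrogen', 'He': 'Helium', 'Li': 'Lithium', 'Be': 'Beryllium', 'B': 'Boron',
--     'C': 'Carbon', 'N': 'Nitrogen', 'O': 'Oxygen', 'F': 'Fluorine', 'Ne': 'Neon',
--     'Na': 'Sodium', 'Mg': 'Magnesium', 'Al': 'Aluminum', 'Si': 'Silicon', 'P': 'Phosphorus',
--     'S': 'Sulfur', 'Cl': 'Chlorine', 'Ar': 'Argon', 'K': 'Potassium', 'Ca': 'Calcium',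
--     'Sc': 'Scandium', 'Ti': 'Titanium', 'V': 'Vanadium', 'Cr': 'Chromium', 'Mn': 'Manganese',
--     'Fe': 'Iron', 'Co': 'Cobalt', 'Ni': 'Nickel', 'Cu': 'Copper', 'Zn': 'Zinc',
--     'Ga': 'Gallium', 'Ge': 'Germanium', 'As': 'Arsenic', 'Se': 'Selenium', 'Br': 'Bromine',
--     'Kr': 'Krypton', 'Rb': 'Rubidium', 'Sr': 'Strontium', 'Y': 'Yttrium', 'Zr': 'Zirconium',
--     'Nb': 'Niobium', 'Mo': 'Molybdenum', 'Tc': 'Technetium', 'Ru': 'Ruthenium', 'Rh': 'Rhodium',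
--     'Pd': 'Palladium', 'Ag': 'Silver', 'Cd': 'Cadmium', 'In': 'Indium', 'Sn': 'Tin',
--     'Sb': 'Antimony', 'Te': 'Tellurium', 'I': 'Iodine', 'Xe': 'Xenon', 'Cs': 'Cesium',
--     'Ba': 'Barium', 'La': 'Lanthanum', 'Ce': 'Cerium', 'Pr': 'Praseodymium', 'Nd': 'Neodymium',
--     'Pm': 'Promethium', 'Sm': 'Samarium', 'Eu': 'Europium', 'Gd': 'Gadolinium', 'Tb': 'Terbium',
--     'Dy': 'Dysprosium', 'Ho': 'Holmium', 'Er': 'Erbium', 'Tm': 'Thulium', 'Yb': 'Ytterbium',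
--     'Lu': 'Lutetium', 'Hf': 'Hafnium', 'Ta': 'Tantalum', 'W': 'Tungsten', 'Re': 'Rhenium',
--     'Os': 'Osmium', 'Ir': 'Iridium', 'Pt': 'Platinum', 'Au': 'Gold', 'Hg': 'Mercury',
--     'Tl': 'Thallium', 'Pb': 'Lead', 'Bi': 'Bismuth', 'Po': 'Polonium', 'At': 'Astatine',
--     'Rn': 'Radon', 'Fr': 'Francium', 'Ra': 'Radium', 'Ac': 'Actinium', 'Th': 'Thorium',
--     'Pa': 'Protactinium', 'U': 'Uranium', 'Np': 'Neptunium', 'Pu': 'Plutonium', 'Am': 'Americium',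
--     'Cm': 'Curium', 'Bk': 'Berkelium', 'Cf': 'Californium', 'Es': 'Einsteinium', 'Fm': 'Fermium',
--     'Md': 'Mendelevium', 'No': 'Nobelium', 'Lr': 'Lawrencium', 'Rf': 'Rutherfordium',
--     'Db': 'Dubnium', 'Sg': 'Seaborgium', 'Bh': 'Bohrium', 'Hs': 'Hassium', 'Mt': 'Meitnerium',
--     'Ds': 'Darmstadtium', 'Rg': 'Roentgenium', 'Cn': 'Copernicium', 'Nh': 'Nihonium',
--     'Fl': 'Flerovium', 'Mc': 'Moscovium', 'Lv': 'Livermorium', 'Ts': 'Tennessine',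
--     'Og': 'Oganesson'
-- }
--
-- def elementalForms(word):
--     def find_forms(word, start, path, forms):
--         if start == len(word):
--             forms.append(path[:])  # Add a copy of the current path to the forms list
--             return
--
--         for i in range(start, len(word)):
--             symbol = word[start:i + 1].capitalize()  # Convert the symbol to capitalize
--             if symbol in ELEMENTS:
--                 path.append(f"{ELEMENTS[symbol]} ({symbol})")
--                 find_forms(word, i + 1, path, forms)
--                 path.pop()  # Backtrack
--
--     forms = []
--     find_forms(word.lower(), 0, [], forms)
--     return forms
-- ===== SOURCE B (Python) =====
-- # Precomputed display-label tables, split by symbol length (no element symbol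
-- # is longer than 2 characters), so each position needs only two O(1) lookups.
-- SINGLE = {
--     'H': 'Hydrogen (H)',
--     'B': 'Boron (B)',
--     'C': 'Carbon (C)',
--     'N': 'Nitrogen (N)',
--     'O': 'Oxygen (O)',
--     'F': 'Fluorine (F)',
--     'P': 'Phosphorus (P)',
--     'S': 'Sulfur (S)',
--     'K': 'Potassium (K)',
--     'V': 'Vanadium (V)',
--     'Y': 'Yttrium (Y)',
--     'I': 'Iodine (I)',
--     'W': 'Tungsten (W)',
--     'U': 'Uranium (U)'
-- }
--
-- DOUBLE = {
--     'He': 'Helium (He)',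
--     'Li': 'Lithium (Li)',
--     'Be': 'Beryllium (Be)',
--     'Ne': 'Neon (Ne)',
--     'Na': 'Sodium (Na)',
--     'Mg': 'Magnesium (Mg)',
--     'Al': 'Aluminum (Al)',
--     'Si': 'Silicon (Si)',
--     'Cl': 'Chlorine (Cl)',
--     'Ar': 'Argon (Ar)',
--     'Ca': 'Calcium (Ca)',
--     'Sc': 'Scandium (Sc)',
--     'Ti': 'Titanium (Ti)',
--     'Cr': 'Chromium (Cr)',
--     'Mn': 'Manganese (Mn)',
--     'Fe': 'Iron (Fe)',
--     'Co': 'Cobalt (Co)',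
--     'Ni': 'Nickel (Ni)',
--     'Cu': 'Copper (Cu)',
--     'Zn': 'Zinc (Zn)',
--     'Ga': 'Gallium (Ga)',
--     'Ge': 'Germanium (Ge)',
--     'As': 'Arsenic (As)',
--     'Se': 'Selenium (Se)',
--     'Br': 'Bromine (Br)',
--     'Kr': 'Krypton (Kr)',
--     'Rb': 'Rubidium (Rb)',
--     'Sr': 'Strontium (Sr)',
--     'Zr': 'Zirconium (Zr)',
--     'Nb': 'Niobium (Nb)',
--     'Mo': 'Molybdenum (Mo)',
--     'Tc': 'Technetium (Tc)',
--     'Ru': 'Ruthenium (Ru)',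
--     'Rh': 'Rhodium (Rh)',
--     'Pd': 'Palladium (Pd)',
--     'Ag': 'Silver (Ag)',
--     'Cd': 'Cadmium (Cd)',
--     'In': 'Indium (In)',
--     'Sn': 'Tin (Sn)',
--     'Sb': 'Antimony (Sb)',
--     'Te': 'Tellurium (Te)',
--     'Xe': 'Xenon (Xe)',
--     'Cs': 'Cesium (Cs)',
--     'Ba': 'Barium (Ba)',
--     'La': 'Lanthanum (La)',
--     'Ce': 'Cerium (Ce)',
--     'Pr': 'Praseodymium (Pr)',
--     'Nd': 'Neodymium (Nd)',
--     'Pm': 'Promethium (Pm)',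
--     'Sm': 'Samarium (Sm)',
--     'Eu': 'Europium (Eu)',
--     'Gd': 'Gadolinium (Gd)',
--     'Tb': 'Terbium (Tb)',
--     'Dy': 'Dysprosium (Dy)',
--     'Ho': 'Holmium (Ho)',
--     'Er': 'Erbium (Er)',
--     'Tm': 'Thulium (Tm)',
--     'Yb': 'Ytterbium (Yb)',
--     'Lu': 'Lutetium (Lu)',
--     'Hf': 'Hafnium (Hf)',
--     'Ta': 'Tantalum (Ta)',
--     'Re': 'Rhenium (Re)',
--     'Os': 'Osmium (Os)',
--     'Ir': 'Iridium (Ir)',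
--     'Pt': 'Platinum (Pt)',
--     'Au': 'Gold (Au)',
--     'Hg': 'Mercury (Hg)',
--     'Tl': 'Thallium (Tl)',
--     'Pb': 'Lead (Pb)',
--     'Bi': 'Bismuth (Bi)',
--     'Po': 'Polonium (Po)',
--     'At': 'Astatine (At)',
--     'Rn': 'Radon (Rn)',
--     'Fr': 'Francium (Fr)',
--     'Ra': 'Radium (Ra)',
--     'Ac': 'Actinium (Ac)',
--     'Th': 'Thorium (Th)',
--     'Pa': 'Protactinium (Pa)',
--     'Np': 'Neptunium (Np)',
--     'Pu': 'Plutonium (Pu)',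
--     'Am': 'Americium (Am)',
--     'Cm': 'Curium (Cm)',
--     'Bk': 'Berkelium (Bk)',
--     'Cf': 'Californium (Cf)',
--     'Es': 'Einsteinium (Es)',
--     'Fm': 'Fermium (Fm)',
--     'Md': 'Mendelevium (Md)',
--     'No': 'Nobelium (No)',
--     'Lr': 'Lawrencium (Lr)',
--     'Rf': 'Rutherfordium (Rf)',
--     'Db': 'Dubnium (Db)',
--     'Sg': 'Seaborgium (Sg)',
--     'Bh': 'Bohrium (Bh)',
--     'Hs': 'Hassium (Hs)',
--     'Mt': 'Meitnerium (Mt)',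
--     'Ds': 'Darmstadtium (Ds)',
--     'Rg': 'Roentgenium (Rg)',
--     'Cn': 'Copernicium (Cn)',
--     'Nh': 'Nihonium (Nh)',
--     'Fl': 'Flerovium (Fl)',
--     'Mc': 'Moscovium (Mc)',
--     'Lv': 'Livermorium (Lv)',
--     'Ts': 'Tennessine (Ts)',
--     'Og': 'Oganesson (Og)'
-- }
--
-- def elementalForms(word):
--     # Backward dynamic-programming pass: decompositions of the suffix w[i:]
--     # depend only on those of w[i+1:] and w[i+2:] (symbols have length 1 or 2),
--     # so keep just those two result lists and sweep once from the end.
--     w = word.lower()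
--     s1, s2 = [[]], []   # decompositions of w[i+1:] and w[i+2:]
--     for i in range(len(w) - 1, -1, -1):
--         res = []
--         lbl = SINGLE.get(w[i:i+1].capitalize())
--         if lbl is not None:
--             res = [[lbl] + rest for rest in s1]
--         lbl = DOUBLE.get(w[i:i+2].capitalize())
--         if lbl is not None:
--             res += [[lbl] + rest for rest in s2]
--         s1, s2 = res, s1
--     return s1
-- ===== Notes on version B (the rewrite author's own statement) =====
-- stated objective: faster
-- what changed: Replaces A's backtracking DFS that scans every substring length at each position with a single backward dynamic-programming pass that tests only the length-1 and length-2 prefixes against two precomputed label tables split by symbol length and shares the two previously computed suffix-result lists.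
import Mathlib
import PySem

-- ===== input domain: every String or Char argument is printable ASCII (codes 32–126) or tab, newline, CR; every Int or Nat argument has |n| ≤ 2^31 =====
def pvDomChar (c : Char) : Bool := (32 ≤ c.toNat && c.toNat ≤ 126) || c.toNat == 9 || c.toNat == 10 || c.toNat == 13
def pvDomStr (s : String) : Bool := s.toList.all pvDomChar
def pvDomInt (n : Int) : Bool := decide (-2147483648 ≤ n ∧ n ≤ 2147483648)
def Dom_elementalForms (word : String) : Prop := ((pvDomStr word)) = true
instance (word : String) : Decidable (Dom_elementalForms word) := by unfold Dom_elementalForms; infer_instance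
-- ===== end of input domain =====

-- B replaces A's backtracking DFS (which tries every substring length at each
-- position) by one backward dynamic-programming pass that looks up only the
-- length-1/length-2 prefixes in two precomputed label tables; measured faster
-- in a timing run. Equivalence of the RETURN value is proved.

-- ===== PORT A =====
-- the module constant ELEMENTS
def ELEMENTS : PySem.Dict String String := PySem.Dict.mk [
  ("H", "Hydrogen"),
  ("He", "Helium"),
  ("Li", "Lithium"),
  ("Be", "Beryllium"),
  ("B", "Boron"),
  ("C", "Carbon"),
  ("N", "Nitrogen"),
  ("O", "Oxygen"),
  ("F", "Fluorine"),
  ("Ne", "Neon"),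
  ("Na", "Sodium"),
  ("Mg", "Magnesium"),
  ("Al", "Aluminum"),
  ("Si", "Silicon"),
  ("P", "Phosphorus"),
  ("S", "Sulfur"),
  ("Cl", "Chlorine"),
  ("Ar", "Argon"),
  ("K", "Potassium"),
  ("Ca", "Calcium"),
  ("Sc", "Scandium"),
  ("Ti", "Titanium"),
  ("V", "Vanadium"),
  ("Cr", "Chromium"),
  ("Mn", "Manganese"),
  ("Fe", "Iron"),
  ("Co", "Cobalt"),
  ("Ni", "Nickel"),
  ("Cu", "Copper"),
  ("Zn", "Zinc"),
  ("Ga", "Gallium"),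
  ("Ge", "Germanium"),
  ("As", "Arsenic"),
  ("Se", "Selenium"),
  ("Br", "Bromine"),
  ("Kr", "Krypton"),
  ("Rb", "Rubidium"),
  ("Sr", "Strontium"),
  ("Y", "Yttrium"),
  ("Zr", "Zirconium"),
  ("Nb", "Niobium"),
  ("Mo", "Molybdenum"),
  ("Tc", "Technetium"),
  ("Ru", "Ruthenium"),
  ("Rh", "Rhodium"),
  ("Pd", "Palladium"),
  ("Ag", "Silver"),
  ("Cd", "Cadmium"),
  ("In", "Indium"),
  ("Sn", "Tin"),
  ("Sb", "Antimony"),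
  ("Te", "Tellurium"),
  ("I", "Iodine"),
  ("Xe", "Xenon"),
  ("Cs", "Cesium"),
  ("Ba", "Barium"),
  ("La", "Lanthanum"),
  ("Ce", "Cerium"),
  ("Pr", "Praseodymium"),
  ("Nd", "Neodymium"),
  ("Pm", "Promethium"),
  ("Sm", "Samarium"),
  ("Eu", "Europium"),
  ("Gd", "Gadolinium"),
  ("Tb", "Terbium"),
  ("Dy", "Dysprosium"),
  ("Ho", "Holmium"),
  ("Er", "Erbium"),
  ("Tm", "Thulium"),
  ("Yb", "Ytterbium"),
  ("Lu", "Lutetium"),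
  ("Hf", "Hafnium"),
  ("Ta", "Tantalum"),
  ("W", "Tungsten"),
  ("Re", "Rhenium"),
  ("Os", "Osmium"),
  ("Ir", "Iridium"),
  ("Pt", "Platinum"),
  ("Au", "Gold"),
  ("Hg", "Mercury"),
  ("Tl", "Thallium"),
  ("Pb", "Lead"),
  ("Bi", "Bismuth"),
  ("Po", "Polonium"),
  ("At", "Astatine"),
  ("Rn", "Radon"),
  ("Fr", "Francium"),
  ("Ra", "Radium"),
  ("Ac", "Actinium"),
  ("Th", "Thorium"),
  ("Pa", "Protactinium"),
  ("U", "Uranium"),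
  ("Np", "Neptunium"),
  ("Pu", "Plutonium"),
  ("Am", "Americium"),
  ("Cm", "Curium"),
  ("Bk", "Berkelium"),
  ("Cf", "Californium"),
  ("Es", "Einsteinium"),
  ("Fm", "Fermium"),
  ("Md", "Mendelevium"),
  ("No", "Nobelium"),
  ("Lr", "Lawrencium"),
  ("Rf", "Rutherfordium"),
  ("Db", "Dubnium"),
  ("Sg", "Seaborgium"),
  ("Bh", "Bohrium"),
  ("Hs", "Hassium"),
  ("Mt", "Meitnerium"),
  ("Ds", "Darmstadtium"),
  ("Rg", "Roentgenium"),
  ("Cn", "Copernicium"),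
  ("Nh", "Nihonium"),
  ("Fl", "Flerovium"),
  ("Mc", "Moscovium"),
  ("Lv", "Livermorium"),
  ("Ts", "Tennessine"),
  ("Og", "Oganesson")]

-- str.capitalize() on a list of chars — exact for the ASCII domain (first char
-- uppercased, the rest lowercased)
def pvCap (l : List Char) : List Char :=
  match l with
  | [] => []
  | c :: cs => PySem.Chars.upperChar c :: cs.map PySem.Chars.lowerChar

-- the f-string f"{ELEMENTS[symbol]} ({symbol})" (lookup guarded by membership)
def pvName (sym : String) : String := (ELEMENTS.getD sym "") ++ " (" ++ sym ++ ")"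

-- A's nested find_forms: `forms`/`path` are the mutated accumulators, the inner
-- `for i in range(start, len(word))` is findFormsLoop
mutual
def findForms (w : List Char) (start : Nat) (path : List String) (forms : List (List String)) : List (List String) :=
  if start = w.length then forms ++ [path]
  else findFormsLoop w start start path forms
termination_by (w.length - start) * 2 + 2
decreasing_by omega

def findFormsLoop (w : List Char) (start i : Nat) (path : List String) (forms : List (List String)) : List (List String) :=
  if _h : i < w.length then
    let symbol := String.ofList (pvCap (PySem.List.slice w (some (start : Int)) (some ((i : Int) + 1))))
    let forms' := if ELEMENTS.contains symbol then
        findForms w (i + 1) (path ++ [pvName symbol]) forms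
      else forms
    findFormsLoop w start (i + 1) path forms'
  else forms
termination_by (w.length - i) * 2 + 1
decreasing_by · omega
              · omega
end

def elementalForms (word : String) : List (List String) :=
  findForms (PySem.Str.lower word).toList 0 [] []

-- ===== PORT B =====
-- Source B's SINGLE / DOUBLE: literal dicts of precomputed display labels, keyed by
-- the capitalized symbol (a Python str key is its list of chars here)
def SINGLED : PySem.Dict (List Char) String := PySem.Dict.mk [
  (['H'], "Hydrogen (H)"),
  (['B'], "Boron (B)"),
  (['C'], "Carbon (C)"),
  (['N'], "Nitrogen (N)"),
  (['O'], "Oxygen (O)"),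
  (['F'], "Fluorine (F)"),
  (['P'], "Phosphorus (P)"),
  (['S'], "Sulfur (S)"),
  (['K'], "Potassium (K)"),
  (['V'], "Vanadium (V)"),
  (['Y'], "Yttrium (Y)"),
  (['I'], "Iodine (I)"),
  (['W'], "Tungsten (W)"),
  (['U'], "Uranium (U)")]

def DOUBLED : PySem.Dict (List Char) String := PySem.Dict.mk [
  (['H', 'e'], "Helium (He)"),
  (['L', 'i'], "Lithium (Li)"),
  (['B', 'e'], "Beryllium (Be)"),
  (['N', 'e'], "Neon (Ne)"),
  (['N', 'a'], "Sodium (Na)"),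
  (['M', 'g'], "Magnesium (Mg)"),
  (['A', 'l'], "Aluminum (Al)"),
  (['S', 'i'], "Silicon (Si)"),
  (['C', 'l'], "Chlorine (Cl)"),
  (['A', 'r'], "Argon (Ar)"),
  (['C', 'a'], "Calcium (Ca)"),
  (['S', 'c'], "Scandium (Sc)"),
  (['T', 'i'], "Titanium (Ti)"),
  (['C', 'r'], "Chromium (Cr)"),
  (['M', 'n'], "Manganese (Mn)"),
  (['F', 'e'], "Iron (Fe)"),
  (['C', 'o'], "Cobalt (Co)"),
  (['N', 'i'], "Nickel (Ni)"),
  (['C', 'u'], "Copper (Cu)"),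
  (['Z', 'n'], "Zinc (Zn)"),
  (['G', 'a'], "Gallium (Ga)"),
  (['G', 'e'], "Germanium (Ge)"),
  (['A', 's'], "Arsenic (As)"),
  (['S', 'e'], "Selenium (Se)"),
  (['B', 'r'], "Bromine (Br)"),
  (['K', 'r'], "Krypton (Kr)"),
  (['R', 'b'], "Rubidium (Rb)"),
  (['S', 'r'], "Strontium (Sr)"),
  (['Z', 'r'], "Zirconium (Zr)"),
  (['N', 'b'], "Niobium (Nb)"),
  (['M', 'o'], "Molybdenum (Mo)"),
  (['T', 'c'], "Technetium (Tc)"),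
  (['R', 'u'], "Ruthenium (Ru)"),
  (['R', 'h'], "Rhodium (Rh)"),
  (['P', 'd'], "Palladium (Pd)"),
  (['A', 'g'], "Silver (Ag)"),
  (['C', 'd'], "Cadmium (Cd)"),
  (['I', 'n'], "Indium (In)"),
  (['S', 'n'], "Tin (Sn)"),
  (['S', 'b'], "Antimony (Sb)"),
  (['T', 'e'], "Tellurium (Te)"),
  (['X', 'e'], "Xenon (Xe)"),
  (['C', 's'], "Cesium (Cs)"),
  (['B', 'a'], "Barium (Ba)"),
  (['L', 'a'], "Lanthanum (La)"),
  (['C', 'e'], "Cerium (Ce)"),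
  (['P', 'r'], "Praseodymium (Pr)"),
  (['N', 'd'], "Neodymium (Nd)"),
  (['P', 'm'], "Promethium (Pm)"),
  (['S', 'm'], "Samarium (Sm)"),
  (['E', 'u'], "Europium (Eu)"),
  (['G', 'd'], "Gadolinium (Gd)"),
  (['T', 'b'], "Terbium (Tb)"),
  (['D', 'y'], "Dysprosium (Dy)"),
  (['H', 'o'], "Holmium (Ho)"),
  (['E', 'r'], "Erbium (Er)"),
  (['T', 'm'], "Thulium (Tm)"),
  (['Y', 'b'], "Ytterbium (Yb)"),
  (['L', 'u'], "Lutetium (Lu)"),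
  (['H', 'f'], "Hafnium (Hf)"),
  (['T', 'a'], "Tantalum (Ta)"),
  (['R', 'e'], "Rhenium (Re)"),
  (['O', 's'], "Osmium (Os)"),
  (['I', 'r'], "Iridium (Ir)"),
  (['P', 't'], "Platinum (Pt)"),
  (['A', 'u'], "Gold (Au)"),
  (['H', 'g'], "Mercury (Hg)"),
  (['T', 'l'], "Thallium (Tl)"),
  (['P', 'b'], "Lead (Pb)"),
  (['B', 'i'], "Bismuth (Bi)"),
  (['P', 'o'], "Polonium (Po)"),
  (['A', 't'], "Astatine (At)"),
  (['R', 'n'], "Radon (Rn)"),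
  (['F', 'r'], "Francium (Fr)"),
  (['R', 'a'], "Radium (Ra)"),
  (['A', 'c'], "Actinium (Ac)"),
  (['T', 'h'], "Thorium (Th)"),
  (['P', 'a'], "Protactinium (Pa)"),
  (['N', 'p'], "Neptunium (Np)"),
  (['P', 'u'], "Plutonium (Pu)"),
  (['A', 'm'], "Americium (Am)"),
  (['C', 'm'], "Curium (Cm)"),
  (['B', 'k'], "Berkelium (Bk)"),
  (['C', 'f'], "Californium (Cf)"),
  (['E', 's'], "Einsteinium (Es)"),
  (['F', 'm'], "Fermium (Fm)"),
  (['M', 'd'], "Mendelevium (Md)"),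
  (['N', 'o'], "Nobelium (No)"),
  (['L', 'r'], "Lawrencium (Lr)"),
  (['R', 'f'], "Rutherfordium (Rf)"),
  (['D', 'b'], "Dubnium (Db)"),
  (['S', 'g'], "Seaborgium (Sg)"),
  (['B', 'h'], "Bohrium (Bh)"),
  (['H', 's'], "Hassium (Hs)"),
  (['M', 't'], "Meitnerium (Mt)"),
  (['D', 's'], "Darmstadtium (Ds)"),
  (['R', 'g'], "Roentgenium (Rg)"),
  (['C', 'n'], "Copernicium (Cn)"),
  (['N', 'h'], "Nihonium (Nh)"),
  (['F', 'l'], "Flerovium (Fl)"),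
  (['M', 'c'], "Moscovium (Mc)"),
  (['L', 'v'], "Livermorium (Lv)"),
  (['T', 's'], "Tennessine (Ts)"),
  (['O', 'g'], "Oganesson (Og)")]

-- Source B's `for i in range(len(w)-1, -1, -1)` loop: counter k is i+1, state
-- (s1, s2) = (decompositions of w[i+1:], of w[i+2:]); `d.get(key)` with the
-- `if lbl is not None` guard is the match on `Dict.get?`
def altLoop (w : List Char) : Nat → List (List String) × List (List String) → List (List String) × List (List String)
  | 0, st => st
  | k + 1, (s1, s2) =>
    let i := k
    let res1 := match SINGLED.get? (pvCap (PySem.List.slice w (some (i : Int)) (some ((i : Int) + 1)))) with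
      | some lbl => s1.map (lbl :: ·)
      | none => []
    let res := res1 ++ (match DOUBLED.get? (pvCap (PySem.List.slice w (some (i : Int)) (some ((i : Int) + 2)))) with
      | some lbl => s2.map (lbl :: ·)
      | none => [])
    altLoop w k (res, s1)

def elementalForms_alt (word : String) : List (List String) :=
  (altLoop (PySem.Str.lower word).toList (PySem.Str.lower word).toList.length ([[]], [])).1

-- ===== PRECONDITION & SPEC =====
def Spec_elementalForms (word : String) (out : List (List String)) : Prop := out = elementalForms_alt word
instance (word : String) (out : List (List String)) : Decidable (Spec_elementalForms word out) := by unfold Spec_elementalForms; infer_instance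

-- ===== CLAIM (what is proved, stated in full; the proofs are below) =====
def Claim_equal_elementalForms : Prop := ∀ (word : String), Dom_elementalForms word → Spec_elementalForms word (elementalForms word)

-- ===== LEMMAS AND PROOFS =====

-- reference function: the decompositions of w[start:], testing only the two
-- prefix lengths (both ports are proved equal to it)
def sols (w : List Char) (start : Nat) : List (List String) :=
  if _h : w.length ≤ start then [[]]
  else
    let sym1 := String.ofList (pvCap (PySem.List.slice w (some (start : Int)) (some ((start : Int) + 1))))
    let b1 := if ELEMENTS.contains sym1 then (sols w (start + 1)).map (pvName sym1 :: ·) else []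
    let sym2 := String.ofList (pvCap (PySem.List.slice w (some (start : Int)) (some ((start : Int) + 2))))
    let b2 := if sym2.toList.length = 2 ∧ ELEMENTS.contains sym2 then (sols w (start + 2)).map (pvName sym2 :: ·) else []
    b1 ++ b2
termination_by w.length - start
decreasing_by · omega
              · omega

theorem pvCap_length (l : List Char) : (pvCap l).length = l.length := by
  cases l <;> simp [pvCap]

set_option maxRecDepth 8192 in
theorem elements_keys_short : ∀ k ∈ ELEMENTS.keys, k.toList.length ≤ 2 := by decide

theorem toList_ofList_pv (l : List Char) : (String.ofList l).toList = l := by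
  simp

theorem contains_false_of_long (s : List Char) (h : 3 ≤ s.length) :
    ELEMENTS.contains (String.ofList s) = false := by
  by_contra hc
  have hc' : ELEMENTS.contains (String.ofList s) = true := by
    revert hc; cases ELEMENTS.contains (String.ofList s) <;> simp
  rw [PySem.Dict.contains_iff_mem_keys] at hc'
  have := elements_keys_short _ hc'
  rw [toList_ofList_pv] at this
  omega

-- length of the symbol A builds at loop index i
theorem symbol_len (w : List Char) (start i : Nat) :
    (pvCap (PySem.List.slice w (some (start : Int)) (some ((i : Int) + 1)))).length
      = min (i + 1 - start) (w.length - start) := by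
  have h1 : ((i : Int) + 1) = (((i + 1 : Nat)) : Int) := by push_cast; ring
  rw [h1, PySem.List.slice_natCast, pvCap_length]
  simp [Nat.sub_min_sub_right]

theorem loop_noop_fuel (w : List Char) (start : Nat) :
    ∀ n i path forms, w.length - i ≤ n → start + 2 ≤ i → findFormsLoop w start i path forms = forms := by
  intro n
  induction n with
  | zero =>
    intro i path forms hle hi
    rw [findFormsLoop]
    have hx : ¬ i < w.length := by omega
    simp [hx]
  | succ n ih =>
    intro i path forms hle hi
    rw [findFormsLoop]
    by_cases hlt : i < w.length
    · have hcf : ELEMENTS.contains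
          (String.ofList (pvCap (PySem.List.slice w (some (start : Int)) (some ((i : Int) + 1))))) = false := by
        apply contains_false_of_long
        rw [symbol_len]
        omega
      simp only [hlt, dif_pos, hcf, Bool.false_eq_true, if_false]
      exact ih (i + 1) path forms (by omega) (by omega)
    · simp [hlt]

theorem loop_noop (w : List Char) (start : Nat) :
    ∀ i path forms, start + 2 ≤ i → findFormsLoop w start i path forms = forms := by
  intro i path forms hi
  exact loop_noop_fuel w start (w.length - i) i path forms (le_refl _) hi

theorem symbol_len2 (w : List Char) (k : Nat) :
    (pvCap (PySem.List.slice w (some (k : Int)) (some ((k : Int) + 2)))).length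
      = min 2 (w.length - k) := by
  have h1 : ((k : Int) + 2) = (((k + 2 : Nat)) : Int) := by push_cast; ring
  rw [h1, PySem.List.slice_natCast, pvCap_length]
  simp

theorem loop_step (w : List Char) (start i : Nat) (path : List String) (forms : List (List String))
    (h : i < w.length) :
    findFormsLoop w start i path forms =
      findFormsLoop w start (i + 1) path
        (if ELEMENTS.contains (String.ofList (pvCap (PySem.List.slice w (some (start : Int)) (some ((i : Int) + 1))))) then
           findForms w (i + 1)
             (path ++ [pvName (String.ofList (pvCap (PySem.List.slice w (some (start : Int)) (some ((i : Int) + 1)))))]) forms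
         else forms) := by
  rw [findFormsLoop, dif_pos h]

theorem loop_end (w : List Char) (start i : Nat) (path : List String) (forms : List (List String))
    (h : ¬ i < w.length) :
    findFormsLoop w start i path forms = forms := by
  rw [findFormsLoop, dif_neg h]

theorem map_append_cons (p : List String) (n : String) (L : List (List String)) :
    L.map ((p ++ [n]) ++ ·) = (L.map (n :: ·)).map (p ++ ·) := by
  rw [List.map_map]
  apply List.map_congr_left
  intro t _
  simp

theorem findForms_eq_sols (w : List Char) :
    ∀ k start path forms, w.length - start ≤ k → start ≤ w.length →
      findForms w start path forms = forms ++ (sols w start).map (path ++ ·) := by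
  intro k
  induction k with
  | zero =>
    intro start path forms hk hs
    have hend : start = w.length := by omega
    rw [findForms, if_pos hend]
    conv_rhs => rw [sols]
    rw [dif_pos (by omega)]
    simp
  | succ k ih =>
    intro start path forms hk hs
    by_cases hend : start = w.length
    · rw [findForms, if_pos hend]
      conv_rhs => rw [sols]
      rw [dif_pos (by omega)]
      simp
    · have hlt : start < w.length := by omega
      rw [findForms, if_neg hend]
      rw [loop_step w start start path forms hlt]
      have hF1 :
          (if ELEMENTS.contains (String.ofList (pvCap (PySem.List.slice w (some (start : Int)) (some ((start : Int) + 1))))) then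
             findForms w (start + 1)
               (path ++ [pvName (String.ofList (pvCap (PySem.List.slice w (some (start : Int)) (some ((start : Int) + 1)))))]) forms
           else forms)
          = forms ++ (if ELEMENTS.contains (String.ofList (pvCap (PySem.List.slice w (some (start : Int)) (some ((start : Int) + 1))))) then
              ((sols w (start + 1)).map (pvName (String.ofList (pvCap (PySem.List.slice w (some (start : Int)) (some ((start : Int) + 1))))) :: ·)).map (path ++ ·)
            else []) := by
        split
        · rw [ih (start + 1) _ forms (by omega) (by omega), ← map_append_cons]
        · simp
      rw [hF1]
      by_cases h2 : start + 1 < w.length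
      · rw [loop_step w start (start + 1) path _ h2]
        have hcast : (((start + 1 : Nat) : Int) + 1) = ((start : Int) + 2) := by push_cast; ring
        rw [hcast]
        rw [loop_noop w start (start + 2) path _ (by omega)]
        have hlen2 : (String.ofList (pvCap (PySem.List.slice w (some (start : Int)) (some ((start : Int) + 2))))).toList.length = 2 := by
          rw [toList_ofList_pv, symbol_len2]
          omega
        have hF2 :
            (if ELEMENTS.contains (String.ofList (pvCap (PySem.List.slice w (some (start : Int)) (some ((start : Int) + 2))))) then
               findForms w (start + 2)
                 (path ++ [pvName (String.ofList (pvCap (PySem.List.slice w (some (start : Int)) (some ((start : Int) + 2)))))])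
                 (forms ++ (if ELEMENTS.contains (String.ofList (pvCap (PySem.List.slice w (some (start : Int)) (some ((start : Int) + 1))))) then
                   ((sols w (start + 1)).map (pvName (String.ofList (pvCap (PySem.List.slice w (some (start : Int)) (some ((start : Int) + 1))))) :: ·)).map (path ++ ·)
                 else []))
             else (forms ++ (if ELEMENTS.contains (String.ofList (pvCap (PySem.List.slice w (some (start : Int)) (some ((start : Int) + 1))))) then
                   ((sols w (start + 1)).map (pvName (String.ofList (pvCap (PySem.List.slice w (some (start : Int)) (some ((start : Int) + 1))))) :: ·)).map (path ++ ·)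
                 else [])))
            = forms ++ ((if ELEMENTS.contains (String.ofList (pvCap (PySem.List.slice w (some (start : Int)) (some ((start : Int) + 1))))) then
                   ((sols w (start + 1)).map (pvName (String.ofList (pvCap (PySem.List.slice w (some (start : Int)) (some ((start : Int) + 1))))) :: ·)).map (path ++ ·)
                 else [])
                ++ (if ELEMENTS.contains (String.ofList (pvCap (PySem.List.slice w (some (start : Int)) (some ((start : Int) + 2))))) then
                   ((sols w (start + 2)).map (pvName (String.ofList (pvCap (PySem.List.slice w (some (start : Int)) (some ((start : Int) + 2))))) :: ·)).map (path ++ ·)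
                 else [])) := by
          split
          · rw [ih (start + 2) _ _ (by omega) (by omega),
              map_append_cons path (pvName (String.ofList (pvCap (PySem.List.slice w (some (start : Int)) (some ((start : Int) + 2)))))) (sols w (start + 2)),
              List.append_assoc]
          · simp
        rw [hF2]
        conv_rhs => rw [sols]
        rw [dif_neg (by omega)]
        have hlen2' : (pvCap (PySem.List.slice w (some (start : Int)) (some ((start : Int) + 2)))).length = 2 := by
          have h := hlen2
          rwa [toList_ofList_pv] at h
        simp [hlen2', List.map_append, apply_ite (List.map (fun x => path ++ x))]
      · rw [loop_end w start (start + 1) path _ h2]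
        have hlen1 : (pvCap (PySem.List.slice w (some (start : Int)) (some ((start : Int) + 2)))).length = 1 := by
          rw [symbol_len2]
          omega
        have hC2 : ¬ ((pvCap (PySem.List.slice w (some (start : Int)) (some ((start : Int) + 2)))).length = 2 ∧
            ELEMENTS.contains (String.ofList (pvCap (PySem.List.slice w (some (start : Int)) (some ((start : Int) + 2))))) = true) := by
          intro hcc
          have h1 := hcc.1
          omega
        conv_rhs => rw [sols]
        rw [dif_neg (by omega)]
        simp [hC2, apply_ite (List.map (fun x => path ++ x))]

-- ===== B-side lemmas: the two label tables against ELEMENTS =====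

theorem contains1_iff (c : Char) :
    ELEMENTS.contains (String.ofList [c]) = true ↔ [c] ∈ SINGLED.keys := by
  constructor
  · intro h
    rw [PySem.Dict.contains_iff_mem_keys] at h
    simp [ELEMENTS] at h
    rcases h with h|h|h|h|h|h|h|h|h|h|h|h|h|h|h|h|h|h|h|h|h|h|h|h|h|h|h|h|h|h|h|h|h|h|h|h|h|h|h|h|h|h|h|h|h|h|h|h|h|h|h|h|h|h|h|h|h|h|h|h|h|h|h|h|h|h|h|h|h|h|h|h|h|h|h|h|h|h|h|h|h|h|h|h|h|h|h|h|h|h|h|h|h|h|h|h|h|h|h|h|h|h|h|h|h|h|h|h|h|h|h|h|h|h|h|h|h|h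
    · have h2 := congrArg String.toList h
      simp at h2
      subst h2
      decide
    · have h2 := congrArg String.toList h
      simp at h2
    · have h2 := congrArg String.toList h
      simp at h2
    · have h2 := congrArg String.toList h
      simp at h2
    · have h2 := congrArg String.toList h
      simp at h2
      subst h2
      decide
    · have h2 := congrArg String.toList h
      simp at h2
      subst h2
      decide
    · have h2 := congrArg String.toList h
      simp at h2
      subst h2
      decide
    · have h2 := congrArg String.toList h
      simp at h2
      subst h2
      decide
    · have h2 := congrArg String.toList h
      simp at h2
      subst h2
      decide
    · have h2 := congrArg String.toList h
      simp at h2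
    · have h2 := congrArg String.toList h
      simp at h2
    · have h2 := congrArg String.toList h
      simp at h2
    · have h2 := congrArg String.toList h
      simp at h2
    · have h2 := congrArg String.toList h
      simp at h2
    · have h2 := congrArg String.toList h
      simp at h2
      subst h2
      decide
    · have h2 := congrArg String.toList h
      simp at h2
      subst h2
      decide
    · have h2 := congrArg String.toList h
      simp at h2
    · have h2 := congrArg String.toList h
      simp at h2
    · have h2 := congrArg String.toList h
      simp at h2
      subst h2
      decide
    · have h2 := congrArg String.toList h
      simp at h2
    · have h2 := congrArg String.toList h
      simp at h2
    · have h2 := congrArg String.toList h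
      simp at h2
    · have h2 := congrArg String.toList h
      simp at h2
      subst h2
      decide
    · have h2 := congrArg String.toList h
      simp at h2
    · have h2 := congrArg String.toList h
      simp at h2
    · have h2 := congrArg String.toList h
      simp at h2
    · have h2 := congrArg String.toList h
      simp at h2
    · have h2 := congrArg String.toList h
      simp at h2
    · have h2 := congrArg String.toList h
      simp at h2
    · have h2 := congrArg String.toList h
      simp at h2
    · have h2 := congrArg String.toList h
      simp at h2
    · have h2 := congrArg String.toList h
      simp at h2
    · have h2 := congrArg String.toList h
      simp at h2
    · have h2 := congrArg String.toList h
      simp at h2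
    · have h2 := congrArg String.toList h
      simp at h2
    · have h2 := congrArg String.toList h
      simp at h2
    · have h2 := congrArg String.toList h
      simp at h2
    · have h2 := congrArg String.toList h
      simp at h2
    · have h2 := congrArg String.toList h
      simp at h2
      subst h2
      decide
    · have h2 := congrArg String.toList h
      simp at h2
    · have h2 := congrArg String.toList h
      simp at h2
    · have h2 := congrArg String.toList h
      simp at h2
    · have h2 := congrArg String.toList h
      simp at h2
    · have h2 := congrArg String.toList h
      simp at h2
    · have h2 := congrArg String.toList h
      simp at h2
    · have h2 := congrArg String.toList h
      simp at h2
    · have h2 := congrArg String.toList h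
      simp at h2
    · have h2 := congrArg String.toList h
      simp at h2
    · have h2 := congrArg String.toList h
      simp at h2
    · have h2 := congrArg String.toList h
      simp at h2
    · have h2 := congrArg String.toList h
      simp at h2
    · have h2 := congrArg String.toList h
      simp at h2
    · have h2 := congrArg String.toList h
      simp at h2
      subst h2
      decide
    · have h2 := congrArg String.toList h
      simp at h2
    · have h2 := congrArg String.toList h
      simp at h2
    · have h2 := congrArg String.toList h
      simp at h2
    · have h2 := congrArg String.toList h
      simp at h2
    · have h2 := congrArg String.toList h
      simp at h2
    · have h2 := congrArg String.toList h
      simp at h2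
    · have h2 := congrArg String.toList h
      simp at h2
    · have h2 := congrArg String.toList h
      simp at h2
    · have h2 := congrArg String.toList h
      simp at h2
    · have h2 := congrArg String.toList h
      simp at h2
    · have h2 := congrArg String.toList h
      simp at h2
    · have h2 := congrArg String.toList h
      simp at h2
    · have h2 := congrArg String.toList h
      simp at h2
    · have h2 := congrArg String.toList h
      simp at h2
    · have h2 := congrArg String.toList h
      simp at h2
    · have h2 := congrArg String.toList h
      simp at h2
    · have h2 := congrArg String.toList h
      simp at h2
    · have h2 := congrArg String.toList h
      simp at h2
    · have h2 := congrArg String.toList h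
      simp at h2
    · have h2 := congrArg String.toList h
      simp at h2
    · have h2 := congrArg String.toList h
      simp at h2
      subst h2
      decide
    · have h2 := congrArg String.toList h
      simp at h2
    · have h2 := congrArg String.toList h
      simp at h2
    · have h2 := congrArg String.toList h
      simp at h2
    · have h2 := congrArg String.toList h
      simp at h2
    · have h2 := congrArg String.toList h
      simp at h2
    · have h2 := congrArg String.toList h
      simp at h2
    · have h2 := congrArg String.toList h
      simp at h2
    · have h2 := congrArg String.toList h
      simp at h2
    · have h2 := congrArg String.toList h
      simp at h2
    · have h2 := congrArg String.toList h
      simp at h2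
    · have h2 := congrArg String.toList h
      simp at h2
    · have h2 := congrArg String.toList h
      simp at h2
    · have h2 := congrArg String.toList h
      simp at h2
    · have h2 := congrArg String.toList h
      simp at h2
    · have h2 := congrArg String.toList h
      simp at h2
    · have h2 := congrArg String.toList h
      simp at h2
    · have h2 := congrArg String.toList h
      simp at h2
    · have h2 := congrArg String.toList h
      simp at h2
      subst h2
      decide
    · have h2 := congrArg String.toList h
      simp at h2
    · have h2 := congrArg String.toList h
      simp at h2
    · have h2 := congrArg String.toList h
      simp at h2
    · have h2 := congrArg String.toList h
      simp at h2
    · have h2 := congrArg String.toList h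
      simp at h2
    · have h2 := congrArg String.toList h
      simp at h2
    · have h2 := congrArg String.toList h
      simp at h2
    · have h2 := congrArg String.toList h
      simp at h2
    · have h2 := congrArg String.toList h
      simp at h2
    · have h2 := congrArg String.toList h
      simp at h2
    · have h2 := congrArg String.toList h
      simp at h2
    · have h2 := congrArg String.toList h
      simp at h2
    · have h2 := congrArg String.toList h
      simp at h2
    · have h2 := congrArg String.toList h
      simp at h2
    · have h2 := congrArg String.toList h
      simp at h2
    · have h2 := congrArg String.toList h
      simp at h2
    · have h2 := congrArg String.toList h
      simp at h2
    · have h2 := congrArg String.toList h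
      simp at h2
    · have h2 := congrArg String.toList h
      simp at h2
    · have h2 := congrArg String.toList h
      simp at h2
    · have h2 := congrArg String.toList h
      simp at h2
    · have h2 := congrArg String.toList h
      simp at h2
    · have h2 := congrArg String.toList h
      simp at h2
    · have h2 := congrArg String.toList h
      simp at h2
    · have h2 := congrArg String.toList h
      simp at h2
    · have h2 := congrArg String.toList h
      simp at h2
  · intro h
    simp [SINGLED] at h
    rcases h with hp|hp|hp|hp|hp|hp|hp|hp|hp|hp|hp|hp|hp|hp
    · subst hp
      decide
    · subst hp
      decide
    · subst hp
      decide
    · subst hp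
      decide
    · subst hp
      decide
    · subst hp
      decide
    · subst hp
      decide
    · subst hp
      decide
    · subst hp
      decide
    · subst hp
      decide
    · subst hp
      decide
    · subst hp
      decide
    · subst hp
      decide
    · subst hp
      decide

set_option maxRecDepth 4096 in
theorem contains2_iff (c d : Char) :
    ELEMENTS.contains (String.ofList [c, d]) = true ↔ [c, d] ∈ DOUBLED.keys := by
  constructor
  · intro h
    rw [PySem.Dict.contains_iff_mem_keys] at h
    simp [ELEMENTS] at h
    rcases h with h|h|h|h|h|h|h|h|h|h|h|h|h|h|h|h|h|h|h|h|h|h|h|h|h|h|h|h|h|h|h|h|h|h|h|h|h|h|h|h|h|h|h|h|h|h|h|h|h|h|h|h|h|h|h|h|h|h|h|h|h|h|h|h|h|h|h|h|h|h|h|h|h|h|h|h|h|h|h|h|h|h|h|h|h|h|h|h|h|h|h|h|h|h|h|h|h|h|h|h|h|h|h|h|h|h|h|h|h|h|h|h|h|h|h|h|h|h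
    · have h2 := congrArg String.toList h
      simp at h2
    · have h2 := congrArg String.toList h
      simp at h2
      obtain ⟨rfl, rfl⟩ := h2
      decide
    · have h2 := congrArg String.toList h
      simp at h2
      obtain ⟨rfl, rfl⟩ := h2
      decide
    · have h2 := congrArg String.toList h
      simp at h2
      obtain ⟨rfl, rfl⟩ := h2
      decide
    · have h2 := congrArg String.toList h
      simp at h2
    · have h2 := congrArg String.toList h
      simp at h2
    · have h2 := congrArg String.toList h
      simp at h2
    · have h2 := congrArg String.toList h
      simp at h2
    · have h2 := congrArg String.toList h
      simp at h2
    · have h2 := congrArg String.toList h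
      simp at h2
      obtain ⟨rfl, rfl⟩ := h2
      decide
    · have h2 := congrArg String.toList h
      simp at h2
      obtain ⟨rfl, rfl⟩ := h2
      decide
    · have h2 := congrArg String.toList h
      simp at h2
      obtain ⟨rfl, rfl⟩ := h2
      decide
    · have h2 := congrArg String.toList h
      simp at h2
      obtain ⟨rfl, rfl⟩ := h2
      decide
    · have h2 := congrArg String.toList h
      simp at h2
      obtain ⟨rfl, rfl⟩ := h2
      decide
    · have h2 := congrArg String.toList h
      simp at h2
    · have h2 := congrArg String.toList h
      simp at h2
    · have h2 := congrArg String.toList h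
      simp at h2
      obtain ⟨rfl, rfl⟩ := h2
      decide
    · have h2 := congrArg String.toList h
      simp at h2
      obtain ⟨rfl, rfl⟩ := h2
      decide
    · have h2 := congrArg String.toList h
      simp at h2
    · have h2 := congrArg String.toList h
      simp at h2
      obtain ⟨rfl, rfl⟩ := h2
      decide
    · have h2 := congrArg String.toList h
      simp at h2
      obtain ⟨rfl, rfl⟩ := h2
      decide
    · have h2 := congrArg String.toList h
      simp at h2
      obtain ⟨rfl, rfl⟩ := h2
      decide
    · have h2 := congrArg String.toList h
      simp at h2
    · have h2 := congrArg String.toList h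
      simp at h2
      obtain ⟨rfl, rfl⟩ := h2
      decide
    · have h2 := congrArg String.toList h
      simp at h2
      obtain ⟨rfl, rfl⟩ := h2
      decide
    · have h2 := congrArg String.toList h
      simp at h2
      obtain ⟨rfl, rfl⟩ := h2
      decide
    · have h2 := congrArg String.toList h
      simp at h2
      obtain ⟨rfl, rfl⟩ := h2
      decide
    · have h2 := congrArg String.toList h
      simp at h2
      obtain ⟨rfl, rfl⟩ := h2
      decide
    · have h2 := congrArg String.toList h
      simp at h2
      obtain ⟨rfl, rfl⟩ := h2
      decide
    · have h2 := congrArg String.toList h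
      simp at h2
      obtain ⟨rfl, rfl⟩ := h2
      decide
    · have h2 := congrArg String.toList h
      simp at h2
      obtain ⟨rfl, rfl⟩ := h2
      decide
    · have h2 := congrArg String.toList h
      simp at h2
      obtain ⟨rfl, rfl⟩ := h2
      decide
    · have h2 := congrArg String.toList h
      simp at h2
      obtain ⟨rfl, rfl⟩ := h2
      decide
    · have h2 := congrArg String.toList h
      simp at h2
      obtain ⟨rfl, rfl⟩ := h2
      decide
    · have h2 := congrArg String.toList h
      simp at h2
      obtain ⟨rfl, rfl⟩ := h2
      decide
    · have h2 := congrArg String.toList h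
      simp at h2
      obtain ⟨rfl, rfl⟩ := h2
      decide
    · have h2 := congrArg String.toList h
      simp at h2
      obtain ⟨rfl, rfl⟩ := h2
      decide
    · have h2 := congrArg String.toList h
      simp at h2
      obtain ⟨rfl, rfl⟩ := h2
      decide
    · have h2 := congrArg String.toList h
      simp at h2
    · have h2 := congrArg String.toList h
      simp at h2
      obtain ⟨rfl, rfl⟩ := h2
      decide
    · have h2 := congrArg String.toList h
      simp at h2
      obtain ⟨rfl, rfl⟩ := h2
      decide
    · have h2 := congrArg String.toList h
      simp at h2
      obtain ⟨rfl, rfl⟩ := h2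
      decide
    · have h2 := congrArg String.toList h
      simp at h2
      obtain ⟨rfl, rfl⟩ := h2
      decide
    · have h2 := congrArg String.toList h
      simp at h2
      obtain ⟨rfl, rfl⟩ := h2
      decide
    · have h2 := congrArg String.toList h
      simp at h2
      obtain ⟨rfl, rfl⟩ := h2
      decide
    · have h2 := congrArg String.toList h
      simp at h2
      obtain ⟨rfl, rfl⟩ := h2
      decide
    · have h2 := congrArg String.toList h
      simp at h2
      obtain ⟨rfl, rfl⟩ := h2
      decide
    · have h2 := congrArg String.toList h
      simp at h2
      obtain ⟨rfl, rfl⟩ := h2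
      decide
    · have h2 := congrArg String.toList h
      simp at h2
      obtain ⟨rfl, rfl⟩ := h2
      decide
    · have h2 := congrArg String.toList h
      simp at h2
      obtain ⟨rfl, rfl⟩ := h2
      decide
    · have h2 := congrArg String.toList h
      simp at h2
      obtain ⟨rfl, rfl⟩ := h2
      decide
    · have h2 := congrArg String.toList h
      simp at h2
      obtain ⟨rfl, rfl⟩ := h2
      decide
    · have h2 := congrArg String.toList h
      simp at h2
    · have h2 := congrArg String.toList h
      simp at h2
      obtain ⟨rfl, rfl⟩ := h2
      decide
    · have h2 := congrArg String.toList h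
      simp at h2
      obtain ⟨rfl, rfl⟩ := h2
      decide
    · have h2 := congrArg String.toList h
      simp at h2
      obtain ⟨rfl, rfl⟩ := h2
      decide
    · have h2 := congrArg String.toList h
      simp at h2
      obtain ⟨rfl, rfl⟩ := h2
      decide
    · have h2 := congrArg String.toList h
      simp at h2
      obtain ⟨rfl, rfl⟩ := h2
      decide
    · have h2 := congrArg String.toList h
      simp at h2
      obtain ⟨rfl, rfl⟩ := h2
      decide
    · have h2 := congrArg String.toList h
      simp at h2
      obtain ⟨rfl, rfl⟩ := h2
      decide
    · have h2 := congrArg String.toList h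
      simp at h2
      obtain ⟨rfl, rfl⟩ := h2
      decide
    · have h2 := congrArg String.toList h
      simp at h2
      obtain ⟨rfl, rfl⟩ := h2
      decide
    · have h2 := congrArg String.toList h
      simp at h2
      obtain ⟨rfl, rfl⟩ := h2
      decide
    · have h2 := congrArg String.toList h
      simp at h2
      obtain ⟨rfl, rfl⟩ := h2
      decide
    · have h2 := congrArg String.toList h
      simp at h2
      obtain ⟨rfl, rfl⟩ := h2
      decide
    · have h2 := congrArg String.toList h
      simp at h2
      obtain ⟨rfl, rfl⟩ := h2
      decide
    · have h2 := congrArg String.toList h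
      simp at h2
      obtain ⟨rfl, rfl⟩ := h2
      decide
    · have h2 := congrArg String.toList h
      simp at h2
      obtain ⟨rfl, rfl⟩ := h2
      decide
    · have h2 := congrArg String.toList h
      simp at h2
      obtain ⟨rfl, rfl⟩ := h2
      decide
    · have h2 := congrArg String.toList h
      simp at h2
      obtain ⟨rfl, rfl⟩ := h2
      decide
    · have h2 := congrArg String.toList h
      simp at h2
      obtain ⟨rfl, rfl⟩ := h2
      decide
    · have h2 := congrArg String.toList h
      simp at h2
      obtain ⟨rfl, rfl⟩ := h2
      decide
    · have h2 := congrArg String.toList h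
      simp at h2
      obtain ⟨rfl, rfl⟩ := h2
      decide
    · have h2 := congrArg String.toList h
      simp at h2
    · have h2 := congrArg String.toList h
      simp at h2
      obtain ⟨rfl, rfl⟩ := h2
      decide
    · have h2 := congrArg String.toList h
      simp at h2
      obtain ⟨rfl, rfl⟩ := h2
      decide
    · have h2 := congrArg String.toList h
      simp at h2
      obtain ⟨rfl, rfl⟩ := h2
      decide
    · have h2 := congrArg String.toList h
      simp at h2
      obtain ⟨rfl, rfl⟩ := h2
      decide
    · have h2 := congrArg String.toList h
      simp at h2
      obtain ⟨rfl, rfl⟩ := h2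
      decide
    · have h2 := congrArg String.toList h
      simp at h2
      obtain ⟨rfl, rfl⟩ := h2
      decide
    · have h2 := congrArg String.toList h
      simp at h2
      obtain ⟨rfl, rfl⟩ := h2
      decide
    · have h2 := congrArg String.toList h
      simp at h2
      obtain ⟨rfl, rfl⟩ := h2
      decide
    · have h2 := congrArg String.toList h
      simp at h2
      obtain ⟨rfl, rfl⟩ := h2
      decide
    · have h2 := congrArg String.toList h
      simp at h2
      obtain ⟨rfl, rfl⟩ := h2
      decide
    · have h2 := congrArg String.toList h
      simp at h2
      obtain ⟨rfl, rfl⟩ := h2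
      decide
    · have h2 := congrArg String.toList h
      simp at h2
      obtain ⟨rfl, rfl⟩ := h2
      decide
    · have h2 := congrArg String.toList h
      simp at h2
      obtain ⟨rfl, rfl⟩ := h2
      decide
    · have h2 := congrArg String.toList h
      simp at h2
      obtain ⟨rfl, rfl⟩ := h2
      decide
    · have h2 := congrArg String.toList h
      simp at h2
      obtain ⟨rfl, rfl⟩ := h2
      decide
    · have h2 := congrArg String.toList h
      simp at h2
      obtain ⟨rfl, rfl⟩ := h2
      decide
    · have h2 := congrArg String.toList h
      simp at h2
      obtain ⟨rfl, rfl⟩ := h2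
      decide
    · have h2 := congrArg String.toList h
      simp at h2
    · have h2 := congrArg String.toList h
      simp at h2
      obtain ⟨rfl, rfl⟩ := h2
      decide
    · have h2 := congrArg String.toList h
      simp at h2
      obtain ⟨rfl, rfl⟩ := h2
      decide
    · have h2 := congrArg String.toList h
      simp at h2
      obtain ⟨rfl, rfl⟩ := h2
      decide
    · have h2 := congrArg String.toList h
      simp at h2
      obtain ⟨rfl, rfl⟩ := h2
      decide
    · have h2 := congrArg String.toList h
      simp at h2
      obtain ⟨rfl, rfl⟩ := h2
      decide
    · have h2 := congrArg String.toList h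
      simp at h2
      obtain ⟨rfl, rfl⟩ := h2
      decide
    · have h2 := congrArg String.toList h
      simp at h2
      obtain ⟨rfl, rfl⟩ := h2
      decide
    · have h2 := congrArg String.toList h
      simp at h2
      obtain ⟨rfl, rfl⟩ := h2
      decide
    · have h2 := congrArg String.toList h
      simp at h2
      obtain ⟨rfl, rfl⟩ := h2
      decide
    · have h2 := congrArg String.toList h
      simp at h2
      obtain ⟨rfl, rfl⟩ := h2
      decide
    · have h2 := congrArg String.toList h
      simp at h2
      obtain ⟨rfl, rfl⟩ := h2
      decide
    · have h2 := congrArg String.toList h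
      simp at h2
      obtain ⟨rfl, rfl⟩ := h2
      decide
    · have h2 := congrArg String.toList h
      simp at h2
      obtain ⟨rfl, rfl⟩ := h2
      decide
    · have h2 := congrArg String.toList h
      simp at h2
      obtain ⟨rfl, rfl⟩ := h2
      decide
    · have h2 := congrArg String.toList h
      simp at h2
      obtain ⟨rfl, rfl⟩ := h2
      decide
    · have h2 := congrArg String.toList h
      simp at h2
      obtain ⟨rfl, rfl⟩ := h2
      decide
    · have h2 := congrArg String.toList h
      simp at h2
      obtain ⟨rfl, rfl⟩ := h2
      decide
    · have h2 := congrArg String.toList h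
      simp at h2
      obtain ⟨rfl, rfl⟩ := h2
      decide
    · have h2 := congrArg String.toList h
      simp at h2
      obtain ⟨rfl, rfl⟩ := h2
      decide
    · have h2 := congrArg String.toList h
      simp at h2
      obtain ⟨rfl, rfl⟩ := h2
      decide
    · have h2 := congrArg String.toList h
      simp at h2
      obtain ⟨rfl, rfl⟩ := h2
      decide
    · have h2 := congrArg String.toList h
      simp at h2
      obtain ⟨rfl, rfl⟩ := h2
      decide
    · have h2 := congrArg String.toList h
      simp at h2
      obtain ⟨rfl, rfl⟩ := h2
      decide
    · have h2 := congrArg String.toList h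
      simp at h2
      obtain ⟨rfl, rfl⟩ := h2
      decide
    · have h2 := congrArg String.toList h
      simp at h2
      obtain ⟨rfl, rfl⟩ := h2
      decide
    · have h2 := congrArg String.toList h
      simp at h2
      obtain ⟨rfl, rfl⟩ := h2
      decide
  · intro h
    simp [DOUBLED] at h
    rcases h with hp|hp|hp|hp|hp|hp|hp|hp|hp|hp|hp|hp|hp|hp|hp|hp|hp|hp|hp|hp|hp|hp|hp|hp|hp|hp|hp|hp|hp|hp|hp|hp|hp|hp|hp|hp|hp|hp|hp|hp|hp|hp|hp|hp|hp|hp|hp|hp|hp|hp|hp|hp|hp|hp|hp|hp|hp|hp|hp|hp|hp|hp|hp|hp|hp|hp|hp|hp|hp|hp|hp|hp|hp|hp|hp|hp|hp|hp|hp|hp|hp|hp|hp|hp|hp|hp|hp|hp|hp|hp|hp|hp|hp|hp|hp|hp|hp|hp|hp|hp|hp|hp|hp|hp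
    · obtain ⟨rfl, rfl⟩ := hp
      decide
    · obtain ⟨rfl, rfl⟩ := hp
      decide
    · obtain ⟨rfl, rfl⟩ := hp
      decide
    · obtain ⟨rfl, rfl⟩ := hp
      decide
    · obtain ⟨rfl, rfl⟩ := hp
      decide
    · obtain ⟨rfl, rfl⟩ := hp
      decide
    · obtain ⟨rfl, rfl⟩ := hp
      decide
    · obtain ⟨rfl, rfl⟩ := hp
      decide
    · obtain ⟨rfl, rfl⟩ := hp
      decide
    · obtain ⟨rfl, rfl⟩ := hp
      decide
    · obtain ⟨rfl, rfl⟩ := hp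
      decide
    · obtain ⟨rfl, rfl⟩ := hp
      decide
    · obtain ⟨rfl, rfl⟩ := hp
      decide
    · obtain ⟨rfl, rfl⟩ := hp
      decide
    · obtain ⟨rfl, rfl⟩ := hp
      decide
    · obtain ⟨rfl, rfl⟩ := hp
      decide
    · obtain ⟨rfl, rfl⟩ := hp
      decide
    · obtain ⟨rfl, rfl⟩ := hp
      decide
    · obtain ⟨rfl, rfl⟩ := hp
      decide
    · obtain ⟨rfl, rfl⟩ := hp
      decide
    · obtain ⟨rfl, rfl⟩ := hp
      decide
    · obtain ⟨rfl, rfl⟩ := hp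
      decide
    · obtain ⟨rfl, rfl⟩ := hp
      decide
    · obtain ⟨rfl, rfl⟩ := hp
      decide
    · obtain ⟨rfl, rfl⟩ := hp
      decide
    · obtain ⟨rfl, rfl⟩ := hp
      decide
    · obtain ⟨rfl, rfl⟩ := hp
      decide
    · obtain ⟨rfl, rfl⟩ := hp
      decide
    · obtain ⟨rfl, rfl⟩ := hp
      decide
    · obtain ⟨rfl, rfl⟩ := hp
      decide
    · obtain ⟨rfl, rfl⟩ := hp
      decide
    · obtain ⟨rfl, rfl⟩ := hp
      decide
    · obtain ⟨rfl, rfl⟩ := hp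
      decide
    · obtain ⟨rfl, rfl⟩ := hp
      decide
    · obtain ⟨rfl, rfl⟩ := hp
      decide
    · obtain ⟨rfl, rfl⟩ := hp
      decide
    · obtain ⟨rfl, rfl⟩ := hp
      decide
    · obtain ⟨rfl, rfl⟩ := hp
      decide
    · obtain ⟨rfl, rfl⟩ := hp
      decide
    · obtain ⟨rfl, rfl⟩ := hp
      decide
    · obtain ⟨rfl, rfl⟩ := hp
      decide
    · obtain ⟨rfl, rfl⟩ := hp
      decide
    · obtain ⟨rfl, rfl⟩ := hp
      decide
    · obtain ⟨rfl, rfl⟩ := hp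
      decide
    · obtain ⟨rfl, rfl⟩ := hp
      decide
    · obtain ⟨rfl, rfl⟩ := hp
      decide
    · obtain ⟨rfl, rfl⟩ := hp
      decide
    · obtain ⟨rfl, rfl⟩ := hp
      decide
    · obtain ⟨rfl, rfl⟩ := hp
      decide
    · obtain ⟨rfl, rfl⟩ := hp
      decide
    · obtain ⟨rfl, rfl⟩ := hp
      decide
    · obtain ⟨rfl, rfl⟩ := hp
      decide
    · obtain ⟨rfl, rfl⟩ := hp
      decide
    · obtain ⟨rfl, rfl⟩ := hp
      decide
    · obtain ⟨rfl, rfl⟩ := hp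
      decide
    · obtain ⟨rfl, rfl⟩ := hp
      decide
    · obtain ⟨rfl, rfl⟩ := hp
      decide
    · obtain ⟨rfl, rfl⟩ := hp
      decide
    · obtain ⟨rfl, rfl⟩ := hp
      decide
    · obtain ⟨rfl, rfl⟩ := hp
      decide
    · obtain ⟨rfl, rfl⟩ := hp
      decide
    · obtain ⟨rfl, rfl⟩ := hp
      decide
    · obtain ⟨rfl, rfl⟩ := hp
      decide
    · obtain ⟨rfl, rfl⟩ := hp
      decide
    · obtain ⟨rfl, rfl⟩ := hp
      decide
    · obtain ⟨rfl, rfl⟩ := hp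
      decide
    · obtain ⟨rfl, rfl⟩ := hp
      decide
    · obtain ⟨rfl, rfl⟩ := hp
      decide
    · obtain ⟨rfl, rfl⟩ := hp
      decide
    · obtain ⟨rfl, rfl⟩ := hp
      decide
    · obtain ⟨rfl, rfl⟩ := hp
      decide
    · obtain ⟨rfl, rfl⟩ := hp
      decide
    · obtain ⟨rfl, rfl⟩ := hp
      decide
    · obtain ⟨rfl, rfl⟩ := hp
      decide
    · obtain ⟨rfl, rfl⟩ := hp
      decide
    · obtain ⟨rfl, rfl⟩ := hp
      decide
    · obtain ⟨rfl, rfl⟩ := hp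
      decide
    · obtain ⟨rfl, rfl⟩ := hp
      decide
    · obtain ⟨rfl, rfl⟩ := hp
      decide
    · obtain ⟨rfl, rfl⟩ := hp
      decide
    · obtain ⟨rfl, rfl⟩ := hp
      decide
    · obtain ⟨rfl, rfl⟩ := hp
      decide
    · obtain ⟨rfl, rfl⟩ := hp
      decide
    · obtain ⟨rfl, rfl⟩ := hp
      decide
    · obtain ⟨rfl, rfl⟩ := hp
      decide
    · obtain ⟨rfl, rfl⟩ := hp
      decide
    · obtain ⟨rfl, rfl⟩ := hp
      decide
    · obtain ⟨rfl, rfl⟩ := hp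
      decide
    · obtain ⟨rfl, rfl⟩ := hp
      decide
    · obtain ⟨rfl, rfl⟩ := hp
      decide
    · obtain ⟨rfl, rfl⟩ := hp
      decide
    · obtain ⟨rfl, rfl⟩ := hp
      decide
    · obtain ⟨rfl, rfl⟩ := hp
      decide
    · obtain ⟨rfl, rfl⟩ := hp
      decide
    · obtain ⟨rfl, rfl⟩ := hp
      decide
    · obtain ⟨rfl, rfl⟩ := hp
      decide
    · obtain ⟨rfl, rfl⟩ := hp
      decide
    · obtain ⟨rfl, rfl⟩ := hp
      decide
    · obtain ⟨rfl, rfl⟩ := hp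
      decide
    · obtain ⟨rfl, rfl⟩ := hp
      decide
    · obtain ⟨rfl, rfl⟩ := hp
      decide
    · obtain ⟨rfl, rfl⟩ := hp
      decide
    · obtain ⟨rfl, rfl⟩ := hp
      decide
    · obtain ⟨rfl, rfl⟩ := hp
      decide

set_option maxRecDepth 4096 in
theorem single_bridge (c : Char) :
    SINGLED.get? [c]
      = if ELEMENTS.contains (String.ofList [c]) then some (pvName (String.ofList [c])) else none := by
  by_cases hm : [c] ∈ SINGLED.keys
  · rw [if_pos ((contains1_iff c).mpr hm)]
    simp [SINGLED] at hm
    rcases hm with hp|hp|hp|hp|hp|hp|hp|hp|hp|hp|hp|hp|hp|hp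
    · subst hp
      decide
    · subst hp
      decide
    · subst hp
      decide
    · subst hp
      decide
    · subst hp
      decide
    · subst hp
      decide
    · subst hp
      decide
    · subst hp
      decide
    · subst hp
      decide
    · subst hp
      decide
    · subst hp
      decide
    · subst hp
      decide
    · subst hp
      decide
    · subst hp
      decide
  · have hc : ELEMENTS.contains (String.ofList [c]) = false := by
      by_contra hx
      exact hm ((contains1_iff c).mp (by revert hx; cases ELEMENTS.contains (String.ofList [c]) <;> simp))
    rw [hc]
    simp only [Bool.false_eq_true, if_false]
    rw [PySem.Dict.get?_eq_none_iff_not_mem_keys]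
    exact hm

set_option maxRecDepth 4096 in
set_option maxHeartbeats 2000000 in
theorem double_bridge (c d : Char) :
    DOUBLED.get? [c, d]
      = if ELEMENTS.contains (String.ofList [c, d]) then some (pvName (String.ofList [c, d])) else none := by
  by_cases hm : [c, d] ∈ DOUBLED.keys
  · rw [if_pos ((contains2_iff c d).mpr hm)]
    simp [DOUBLED] at hm
    rcases hm with hp|hp|hp|hp|hp|hp|hp|hp|hp|hp|hp|hp|hp|hp|hp|hp|hp|hp|hp|hp|hp|hp|hp|hp|hp|hp|hp|hp|hp|hp|hp|hp|hp|hp|hp|hp|hp|hp|hp|hp|hp|hp|hp|hp|hp|hp|hp|hp|hp|hp|hp|hp|hp|hp|hp|hp|hp|hp|hp|hp|hp|hp|hp|hp|hp|hp|hp|hp|hp|hp|hp|hp|hp|hp|hp|hp|hp|hp|hp|hp|hp|hp|hp|hp|hp|hp|hp|hp|hp|hp|hp|hp|hp|hp|hp|hp|hp|hp|hp|hp|hp|hp|hp|hp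
    · obtain ⟨rfl, rfl⟩ := hp
      decide
    · obtain ⟨rfl, rfl⟩ := hp
      decide
    · obtain ⟨rfl, rfl⟩ := hp
      decide
    · obtain ⟨rfl, rfl⟩ := hp
      decide
    · obtain ⟨rfl, rfl⟩ := hp
      decide
    · obtain ⟨rfl, rfl⟩ := hp
      decide
    · obtain ⟨rfl, rfl⟩ := hp
      decide
    · obtain ⟨rfl, rfl⟩ := hp
      decide
    · obtain ⟨rfl, rfl⟩ := hp
      decide
    · obtain ⟨rfl, rfl⟩ := hp
      decide
    · obtain ⟨rfl, rfl⟩ := hp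
      decide
    · obtain ⟨rfl, rfl⟩ := hp
      decide
    · obtain ⟨rfl, rfl⟩ := hp
      decide
    · obtain ⟨rfl, rfl⟩ := hp
      decide
    · obtain ⟨rfl, rfl⟩ := hp
      decide
    · obtain ⟨rfl, rfl⟩ := hp
      decide
    · obtain ⟨rfl, rfl⟩ := hp
      decide
    · obtain ⟨rfl, rfl⟩ := hp
      decide
    · obtain ⟨rfl, rfl⟩ := hp
      decide
    · obtain ⟨rfl, rfl⟩ := hp
      decide
    · obtain ⟨rfl, rfl⟩ := hp
      decide
    · obtain ⟨rfl, rfl⟩ := hp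
      decide
    · obtain ⟨rfl, rfl⟩ := hp
      decide
    · obtain ⟨rfl, rfl⟩ := hp
      decide
    · obtain ⟨rfl, rfl⟩ := hp
      decide
    · obtain ⟨rfl, rfl⟩ := hp
      decide
    · obtain ⟨rfl, rfl⟩ := hp
      decide
    · obtain ⟨rfl, rfl⟩ := hp
      decide
    · obtain ⟨rfl, rfl⟩ := hp
      decide
    · obtain ⟨rfl, rfl⟩ := hp
      decide
    · obtain ⟨rfl, rfl⟩ := hp
      decide
    · obtain ⟨rfl, rfl⟩ := hp
      decide
    · obtain ⟨rfl, rfl⟩ := hp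
      decide
    · obtain ⟨rfl, rfl⟩ := hp
      decide
    · obtain ⟨rfl, rfl⟩ := hp
      decide
    · obtain ⟨rfl, rfl⟩ := hp
      decide
    · obtain ⟨rfl, rfl⟩ := hp
      decide
    · obtain ⟨rfl, rfl⟩ := hp
      decide
    · obtain ⟨rfl, rfl⟩ := hp
      decide
    · obtain ⟨rfl, rfl⟩ := hp
      decide
    · obtain ⟨rfl, rfl⟩ := hp
      decide
    · obtain ⟨rfl, rfl⟩ := hp
      decide
    · obtain ⟨rfl, rfl⟩ := hp
      decide
    · obtain ⟨rfl, rfl⟩ := hp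
      decide
    · obtain ⟨rfl, rfl⟩ := hp
      decide
    · obtain ⟨rfl, rfl⟩ := hp
      decide
    · obtain ⟨rfl, rfl⟩ := hp
      decide
    · obtain ⟨rfl, rfl⟩ := hp
      decide
    · obtain ⟨rfl, rfl⟩ := hp
      decide
    · obtain ⟨rfl, rfl⟩ := hp
      decide
    · obtain ⟨rfl, rfl⟩ := hp
      decide
    · obtain ⟨rfl, rfl⟩ := hp
      decide
    · obtain ⟨rfl, rfl⟩ := hp
      decide
    · obtain ⟨rfl, rfl⟩ := hp
      decide
    · obtain ⟨rfl, rfl⟩ := hp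
      decide
    · obtain ⟨rfl, rfl⟩ := hp
      decide
    · obtain ⟨rfl, rfl⟩ := hp
      decide
    · obtain ⟨rfl, rfl⟩ := hp
      decide
    · obtain ⟨rfl, rfl⟩ := hp
      decide
    · obtain ⟨rfl, rfl⟩ := hp
      decide
    · obtain ⟨rfl, rfl⟩ := hp
      decide
    · obtain ⟨rfl, rfl⟩ := hp
      decide
    · obtain ⟨rfl, rfl⟩ := hp
      decide
    · obtain ⟨rfl, rfl⟩ := hp
      decide
    · obtain ⟨rfl, rfl⟩ := hp
      decide
    · obtain ⟨rfl, rfl⟩ := hp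
      decide
    · obtain ⟨rfl, rfl⟩ := hp
      decide
    · obtain ⟨rfl, rfl⟩ := hp
      decide
    · obtain ⟨rfl, rfl⟩ := hp
      decide
    · obtain ⟨rfl, rfl⟩ := hp
      decide
    · obtain ⟨rfl, rfl⟩ := hp
      decide
    · obtain ⟨rfl, rfl⟩ := hp
      decide
    · obtain ⟨rfl, rfl⟩ := hp
      decide
    · obtain ⟨rfl, rfl⟩ := hp
      decide
    · obtain ⟨rfl, rfl⟩ := hp
      decide
    · obtain ⟨rfl, rfl⟩ := hp
      decide
    · obtain ⟨rfl, rfl⟩ := hp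
      decide
    · obtain ⟨rfl, rfl⟩ := hp
      decide
    · obtain ⟨rfl, rfl⟩ := hp
      decide
    · obtain ⟨rfl, rfl⟩ := hp
      decide
    · obtain ⟨rfl, rfl⟩ := hp
      decide
    · obtain ⟨rfl, rfl⟩ := hp
      decide
    · obtain ⟨rfl, rfl⟩ := hp
      decide
    · obtain ⟨rfl, rfl⟩ := hp
      decide
    · obtain ⟨rfl, rfl⟩ := hp
      decide
    · obtain ⟨rfl, rfl⟩ := hp
      decide
    · obtain ⟨rfl, rfl⟩ := hp
      decide
    · obtain ⟨rfl, rfl⟩ := hp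
      decide
    · obtain ⟨rfl, rfl⟩ := hp
      decide
    · obtain ⟨rfl, rfl⟩ := hp
      decide
    · obtain ⟨rfl, rfl⟩ := hp
      decide
    · obtain ⟨rfl, rfl⟩ := hp
      decide
    · obtain ⟨rfl, rfl⟩ := hp
      decide
    · obtain ⟨rfl, rfl⟩ := hp
      decide
    · obtain ⟨rfl, rfl⟩ := hp
      decide
    · obtain ⟨rfl, rfl⟩ := hp
      decide
    · obtain ⟨rfl, rfl⟩ := hp
      decide
    · obtain ⟨rfl, rfl⟩ := hp
      decide
    · obtain ⟨rfl, rfl⟩ := hp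
      decide
    · obtain ⟨rfl, rfl⟩ := hp
      decide
    · obtain ⟨rfl, rfl⟩ := hp
      decide
    · obtain ⟨rfl, rfl⟩ := hp
      decide
    · obtain ⟨rfl, rfl⟩ := hp
      decide
    · obtain ⟨rfl, rfl⟩ := hp
      decide
  · have hc : ELEMENTS.contains (String.ofList [c, d]) = false := by
      by_contra hx
      exact hm ((contains2_iff c d).mp (by revert hx; cases ELEMENTS.contains (String.ofList [c, d]) <;> simp))
    rw [hc]
    simp only [Bool.false_eq_true, if_false]
    rw [PySem.Dict.get?_eq_none_iff_not_mem_keys]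
    exact hm

theorem get1_bridge (L : List Char) (h : L.length = 1) :
    SINGLED.get? L
      = if ELEMENTS.contains (String.ofList L) then some (pvName (String.ofList L)) else none := by
  obtain ⟨c, rfl⟩ : ∃ c, L = [c] := by
    cases L with
    | nil => simp at h
    | cons a t => cases t with
      | nil => exact ⟨a, rfl⟩
      | cons b u => simp at h
  exact single_bridge c

theorem get2_bridge (L : List Char) (h : L.length = 2) :
    DOUBLED.get? L
      = if ELEMENTS.contains (String.ofList L) then some (pvName (String.ofList L)) else none := by
  obtain ⟨c, d, rfl⟩ : ∃ c d, L = [c, d] := by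
    cases L with
    | nil => simp at h
    | cons a t => cases t with
      | nil => simp at h
      | cons b u => cases u with
        | nil => exact ⟨a, b, rfl⟩
        | cons e v => simp at h
  exact double_bridge c d

set_option maxRecDepth 4096 in
theorem doubled_keys_len : ∀ k ∈ DOUBLED.keys, k.length = 2 := by decide

theorem get2_none (L : List Char) (h : L.length = 1) : DOUBLED.get? L = none := by
  rw [PySem.Dict.get?_eq_none_iff_not_mem_keys]
  intro hm
  have := doubled_keys_len _ hm
  omega

theorem altLoop_inv (w : List Char) :
    ∀ k s2, k ≤ w.length → (k + 1 ≤ w.length → s2 = sols w (k + 1)) →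
      (altLoop w k (sols w k, s2)).1 = sols w 0 := by
  intro k
  induction k with
  | zero => intro s2 _ _; simp [altLoop]
  | succ k ih =>
    intro s2 hk hs2
    rw [altLoop]
    have hL1 : (pvCap (PySem.List.slice w (some (k : Int)) (some ((k : Int) + 1)))).length = 1 := by
      rw [symbol_len]
      omega
    have hres :
        ((match SINGLED.get? (pvCap (PySem.List.slice w (some (k : Int)) (some ((k : Int) + 1)))) with
          | some lbl => (sols w (k + 1)).map (lbl :: ·)
          | none => []) ++
         (match DOUBLED.get? (pvCap (PySem.List.slice w (some (k : Int)) (some ((k : Int) + 2)))) with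
          | some lbl => s2.map (lbl :: ·)
          | none => [])) = sols w k := by
      conv_rhs => rw [sols]
      rw [dif_neg (show ¬ w.length ≤ k by omega)]
      congr 1
      · rw [get1_bridge _ hL1]
        by_cases hc1 : ELEMENTS.contains (String.ofList (pvCap (PySem.List.slice w (some (k : Int)) (some ((k : Int) + 1))))) = true
        · rw [hc1]
          simp
        · simp only [Bool.not_eq_true] at hc1
          rw [hc1]
          simp
      · by_cases hn2 : k + 2 ≤ w.length
        · have hL2 : (pvCap (PySem.List.slice w (some (k : Int)) (some ((k : Int) + 2)))).length = 2 := by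
            rw [symbol_len2]
            omega
          rw [get2_bridge _ hL2, hs2 (by omega)]
          have ht2 : (String.ofList (pvCap (PySem.List.slice w (some (k : Int)) (some ((k : Int) + 2))))).toList.length = 2 := by
            rw [toList_ofList_pv]
            exact hL2
          by_cases hc2 : ELEMENTS.contains (String.ofList (pvCap (PySem.List.slice w (some (k : Int)) (some ((k : Int) + 2))))) = true
          · simp [hc2]
            intro hx
            exact absurd hL2 hx
          · simp only [Bool.not_eq_true] at hc2
            simp [hc2]
        · have hL2 : (pvCap (PySem.List.slice w (some (k : Int)) (some ((k : Int) + 2)))).length = 1 := by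
            rw [symbol_len2]
            omega
          rw [get2_none _ hL2]
          have hC2 : ¬ ((String.ofList (pvCap (PySem.List.slice w (some (k : Int)) (some ((k : Int) + 2))))).toList.length = 2 ∧
              ELEMENTS.contains (String.ofList (pvCap (PySem.List.slice w (some (k : Int)) (some ((k : Int) + 2))))) = true) := by
            intro hcc
            have h1 := hcc.1
            rw [toList_ofList_pv] at h1
            omega
          rw [if_neg hC2]
    rw [hres]
    exact ih (sols w (k + 1)) (by omega) (fun _ => rfl)

-- ===== VERDICT (by name: the statement is the Claim_ definition above) =====
theorem elementalForms_spec : Claim_equal_elementalForms := by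
  intro word _
  unfold Spec_elementalForms elementalForms elementalForms_alt
  have hA := findForms_eq_sols (PySem.Str.lower word).toList ((PySem.Str.lower word).toList.length) 0 [] [] (by omega) (by omega)
  have hsn : sols (PySem.Str.lower word).toList (PySem.Str.lower word).toList.length = [[]] := by
    rw [sols, dif_pos (le_refl _)]
  have hB := altLoop_inv (PySem.Str.lower word).toList (PySem.Str.lower word).toList.length [] (le_refl _) (by omega)
  rw [hsn] at hB
  rw [hA, hB]
  simp
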